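-- pv_equiv track=rewrite | github.com/neherlab/2024_msc_thesis_otter | benchmark/scripts/format_pirate_output.py | combine_columns
-- ===== SOURCE A (Python) =====
-- def combine_columns(row,max_count):
--     locus_list = []
--     l = 0
--     s = 0
--     dupli="no"
--     sccg="no"
--     singleton="no"
--     for tag in row:
--         if isinstance(tag,str):
--             s+=1
--             if ";" in tag:
--                 for t in tag.split(";"):
--                     locus_list.append(t)
--                     l+=1
--                 dupli="yes"
--             else:
--                 l+=1
--                 locus_list.append(tag)
--     if s==1:
--         singleton="yes"
--     if (l==max_count) and (dupli=="no"):
--         sccg="yes"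
--
--     return locus_list, l, dupli, sccg, singleton
-- ===== SOURCE B (Python) =====
-- def combine_columns(row, max_count):
--     strs = [t for t in row if isinstance(t, str)]
--     locus_list = ";".join(strs).split(";") if strs else []
--     l = len(locus_list)
--     dupli = "yes" if l > len(strs) else "no"
--     singleton = "yes" if len(strs) == 1 else "no"
--     sccg = "yes" if l == max_count and dupli == "no" else "no"
--     return locus_list, l, dupli, sccg, singleton
-- ===== Notes on version B (the rewrite author's own statement) =====
-- stated objective: alternative
-- what changed: Instead of scanning tags and splitting/appending per tag with four mutable accumulators, B joins all string cells into one string with ';' and splits that single string once to get the locus list, deriving dupli purely arithmetically (piece count exceeds cell count iff any cell contained ';') rather than by inspecting tags.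
import Mathlib
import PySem

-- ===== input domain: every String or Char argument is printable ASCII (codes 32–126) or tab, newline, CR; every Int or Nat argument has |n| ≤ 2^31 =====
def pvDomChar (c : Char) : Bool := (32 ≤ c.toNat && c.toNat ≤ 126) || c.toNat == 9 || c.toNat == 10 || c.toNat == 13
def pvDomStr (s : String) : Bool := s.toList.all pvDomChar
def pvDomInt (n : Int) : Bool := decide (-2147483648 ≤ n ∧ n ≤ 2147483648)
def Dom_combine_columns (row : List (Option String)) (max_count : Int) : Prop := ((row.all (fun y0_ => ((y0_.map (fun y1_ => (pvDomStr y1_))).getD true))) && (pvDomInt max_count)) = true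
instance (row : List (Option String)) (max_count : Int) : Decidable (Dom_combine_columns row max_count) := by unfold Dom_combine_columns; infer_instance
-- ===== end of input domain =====

-- B replaces A's single stateful tag loop (four accumulators, per-tag split and branch on ';')
-- by joining all string cells with ';' and splitting that one string once; dupli is derived
-- arithmetically (piece count > cell count) instead of by inspecting tags.


-- ===== PORT A =====
-- one step of A's 'for tag in row' loop; state = (locus_list, l, s, dupli)
def combineStepA (st : List String × Int × Int × String) (tag : Option String) :
    List String × Int × Int × String :=
  match tag with
  | none => st
  | some t =>
    let s' := st.2.2.1 + 1
    if PySem.Str.isIn ";" t then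
      -- inner 'for t in tag.split(";")': append each piece, l += 1
      let p := ((PySem.Str.split? t ";").getD []).foldl
        (fun (p : List String × Int) u => (p.1 ++ [u], p.2 + 1)) (st.1, st.2.1)
      (p.1, p.2, s', "yes")
    else
      (st.1 ++ [t], st.2.1 + 1, s', st.2.2.2)

def combine_columns (row : List (Option String)) (max_count : Int) :
    List String × Int × String × String × String :=
  let st := row.foldl combineStepA ([], 0, 0, "no")
  let locus_list := st.1
  let l := st.2.1
  let s := st.2.2.1
  let dupli := st.2.2.2
  let singleton := if s == 1 then "yes" else "no"
  let sccg := if l == max_count && dupli == "no" then "yes" else "no"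
  (locus_list, l, dupli, sccg, singleton)

-- ===== PORT B =====
def combine_columns_alt (row : List (Option String)) (max_count : Int) :
    List String × Int × String × String × String :=
  let strs := row.filterMap id
  let locus_list :=
    if strs.isEmpty then []
    else (PySem.Str.split? (PySem.Str.join ";" strs) ";").getD []
  let l : Int := locus_list.length
  let dupli := if l > (strs.length : Int) then "yes" else "no"
  let singleton := if strs.length == 1 then "yes" else "no"
  let sccg := if l == max_count && dupli == "no" then "yes" else "no"
  (locus_list, l, dupli, sccg, singleton)

-- ===== PRECONDITION & SPEC =====
def Spec_combine_columns (row : List (Option String)) (max_count : Int) (out : List String × Int × String × String × String) : Prop := out = combine_columns_alt row max_count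
instance (row : List (Option String)) (max_count : Int) (out : List String × Int × String × String × String) : Decidable (Spec_combine_columns row max_count out) := by unfold Spec_combine_columns; infer_instance

-- ===== CLAIM (what is proved, stated in full; the proofs are below) =====
def Claim_equal_combine_columns : Prop := ∀ (row : List (Option String)) (max_count : Int), Dom_combine_columns row max_count → Spec_combine_columns row max_count (combine_columns row max_count)

-- ===== LEMMAS AND PROOFS =====

-- reference splitter on char lists: split at every ';'
def spl : List Char → List (List Char)
  | [] => [[]]
  | c :: rest => if c = ';' then [] :: spl rest
                 else match spl rest with
                      | [] => [[c]]
                      | p :: ps => (c :: p) :: ps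

theorem spl_ne_nil (s : List Char) : spl s ≠ [] := by
  cases s with
  | nil => simp [spl]
  | cons c rest =>
    simp only [spl]
    split_ifs
    · simp
    · cases h : spl rest <;> simp

-- prepend a prefix onto the first piece
def consHead (p : List Char) : List (List Char) → List (List Char)
  | [] => [p]
  | x :: xs => (p ++ x) :: xs

theorem consHead_consHead (a b : List Char) (xs : List (List Char)) :
    consHead a (consHead b xs) = consHead (a ++ b) xs := by
  cases xs <;> simp [consHead]

theorem consHead_nil (xs : List (List Char)) (h : xs ≠ []) : consHead [] xs = xs := by
  cases xs with
  | nil => exact absurd rfl h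
  | cons x xs => simp [consHead]

-- the fueled splitter agrees with spl when fuel suffices
theorem go_spec (s : List Char) (fuel : Nat) (cur : List Char) (acc : List (List Char))
    (hf : s.length ≤ fuel) :
    PySem.Chars.splitOn.go [';'] fuel s cur acc
      = acc.reverse ++ consHead cur.reverse (spl s) := by
  induction s generalizing fuel cur acc with
  | nil =>
    cases fuel <;> simp [PySem.Chars.splitOn.go, spl, consHead]
  | cons c rest ih =>
    cases fuel with
    | zero => simp at hf
    | succ n =>
      have hn : rest.length ≤ n := by simpa using hf
      rw [PySem.Chars.splitOn.go]
      by_cases hc : c = ';'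
      · subst hc
        have hpre : List.isPrefixOf [';'] (';' :: rest) = true := by
          simp [List.isPrefixOf]
        simp only [hpre, if_pos]
        rw [show List.drop ([';'] : List Char).length (';' :: rest) = rest from rfl]
        rw [ih n [] (cur.reverse :: acc) hn]
        simp only [List.reverse_nil]
        rw [consHead_nil _ (spl_ne_nil rest)]
        simp [spl, consHead]
      · have hpre : List.isPrefixOf [';'] (c :: rest) = false := by
          simp [List.isPrefixOf]
          exact fun hcc => absurd hcc.symm hc
        simp only [hpre, Bool.false_eq_true, if_false]
        rw [ih n (c :: cur) acc hn]
        have : spl (c :: rest) = consHead [c] (spl rest) := by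
          simp only [spl, hc, if_false]
          cases h : spl rest <;> simp [consHead]
        rw [this, consHead_consHead]
        simp
theorem splitOn_eq_spl (s : List Char) :
    PySem.Chars.splitOn s [';'] = spl s := by
  rw [PySem.Chars.splitOn, go_spec s (s.length + 1) [] [] (by omega)]
  simp [consHead_nil _ (spl_ne_nil s)]

-- splitting distributes over a ';' in the middle
theorem spl_append (x r : List Char) : spl (x ++ ';' :: r) = spl x ++ spl r := by
  induction x with
  | nil => simp [spl]
  | cons c xs ih =>
    by_cases hc : c = ';'
    · subst hc; simp [spl, ih]
    · simp only [List.cons_append, spl, hc, if_false, ih]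
      cases h : spl xs with
      | nil => exact absurd h (spl_ne_nil xs)
      | cons p ps => simp

-- piece count = semicolon count + 1
theorem spl_length (s : List Char) : (spl s).length = s.count ';' + 1 := by
  induction s with
  | nil => simp [spl]
  | cons c rest ih =>
    by_cases hc : c = ';'
    · subst hc; simp [spl, ih]
    · simp only [spl, hc, if_false]
      cases h : spl rest with
      | nil => exact absurd h (spl_ne_nil rest)
      | cons p ps =>
        have := ih; rw [h] at this
        simp_all

-- splitting the ';'-intercalation of a nonempty list = concatenating the splits
theorem spl_intercalate (x : List Char) (ys : List (List Char)) :
    spl (List.intercalate [';'] (x :: ys)) = (x :: ys).flatMap spl := by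
  induction ys generalizing x with
  | nil => simp [List.intercalate]
  | cons y ys ih =>
    have : List.intercalate [';'] (x :: y :: ys) = x ++ ';' :: List.intercalate [';'] (y :: ys) := by
      simp [List.intercalate, List.intersperse]
    rw [this, spl_append, ih]
    simp

-- the inner append loop of A accumulates the pieces and counts them
theorem innerFold (ps : List String) (ll : List String) (l : Int) :
    ps.foldl (fun (p : List String × Int) u => (p.1 ++ [u], p.2 + 1)) (ll, l)
      = (ll ++ ps, l + ps.length) := by
  induction ps generalizing ll l with
  | nil => simp
  | cons x xs ih => simp [List.foldl, ih]; omega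

-- Str.split? at ";" through spl
theorem split_eq_spl (t : String) :
    (PySem.Str.split? t ";").getD [] = (spl t.toList).map String.ofList := by
  rw [PySem.Str.split?]
  rw [show (";" : String).toList = [';'] from by decide]
  rw [PySem.Chars.split?]
  simp [splitOn_eq_spl]

theorem isIn_semi_iff (t : String) :
    PySem.Str.isIn ";" t = true ↔ ';' ∈ t.toList := by
  rw [PySem.Str.isIn, show (";" : String).toList = [';'] from by decide,
    PySem.Chars.isIn_iff_infix]
  exact List.singleton_infix_iff _ _

-- a semicolon-free string is a single piece
theorem spl_no_semi (s : List Char) (h : ';' ∉ s) : spl s = [s] := by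
  induction s with
  | nil => simp [spl]
  | cons c cs ih =>
    have hc : c ≠ ';' := fun hc => h (by simp [hc])
    have hcs : ';' ∉ cs := fun hm => h (List.mem_cons_of_mem _ hm)
    simp [spl, hc, ih hcs]

-- A's flattened list via spl
theorem flatMap_split (strs : List String) :
    strs.flatMap (fun t => (PySem.Str.split? t ";").getD [])
      = ((strs.map String.toList).flatMap spl).map String.ofList := by
  induction strs with
  | nil => simp
  | cons t ts ih => rw [List.flatMap_cons, split_eq_spl, ih]; simp

-- loop invariant for A's fold, stated against the flattened splits
theorem foldA_inv (row : List (Option String)) (ll : List String) (l s : Int) (d : String) :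
    row.foldl combineStepA (ll, l, s, d)
      = (ll ++ (row.filterMap id).flatMap (fun t => (PySem.Str.split? t ";").getD []),
         l + ((row.filterMap id).flatMap (fun t => (PySem.Str.split? t ";").getD [])).length,
         s + (row.filterMap id).length,
         if (row.filterMap id).any (fun t => PySem.Str.isIn ";" t) then "yes" else d) := by
  induction row generalizing ll l s d with
  | nil => simp
  | cons hd tl ih =>
    cases hd with
    | none => simp [List.foldl, combineStepA, ih]
    | some t =>
      simp only [List.foldl]
      by_cases hs : PySem.Str.isIn ";" t = true
      · have hs2 : PySem.Chars.isIn [';'] t.toList = true := by simpa [PySem.Str.isIn] using hs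
        simp only [combineStepA, hs, if_pos, innerFold]
        rw [ih]
        simp [hs2]
        exact ⟨by ring, by ring⟩
      · have hs' : PySem.Str.isIn ";" t = false := by simpa using hs
        have hs2 : PySem.Chars.isIn [';'] t.toList = false := by simpa [PySem.Str.isIn] using hs'
        have hone : (PySem.Str.split? t ";").getD [] = [t] := by
          rw [split_eq_spl, spl_no_semi _ (fun hm => hs ((isIn_semi_iff t).mpr hm))]
          simp
        simp only [combineStepA, hs', Bool.false_eq_true, if_false]
        rw [ih]
        simp [hs2, hone]
        exact ⟨by ring, by ring⟩

-- B's locus list equals A's flattened splits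
theorem locus_eq (strs : List String) :
    (if strs.isEmpty then []
     else (PySem.Str.split? (PySem.Str.join ";" strs) ";").getD [])
      = strs.flatMap (fun t => (PySem.Str.split? t ";").getD []) := by
  cases strs with
  | nil => simp
  | cons x ys =>
    rw [if_neg (by simp)]
    rw [flatMap_split, PySem.Str.join, split_eq_spl]
    have htl : (String.ofList (PySem.Chars.join (";" : String).toList ((x :: ys).map String.toList))).toList
        = List.intercalate [';'] (x.toList :: ys.map String.toList) := by
      simp [PySem.Chars.join, show (";" : String).toList = [';'] from by decide]
    rw [htl, spl_intercalate]
    simp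

-- the dupli flags agree: more pieces than cells iff some cell has a ';'
theorem dupli_eq (strs : List String) :
    (if ((strs.flatMap (fun t => (PySem.Str.split? t ";").getD [])).length : Int)
         > (strs.length : Int) then "yes" else "no")
      = (if strs.any (fun t => PySem.Str.isIn ";" t) then "yes" else ("no" : String)) := by
  have hlen : (strs.flatMap (fun t => (PySem.Str.split? t ";").getD [])).length
      = strs.length + (strs.map (fun t => t.toList.count ';')).sum := by
    induction strs with
    | nil => simp
    | cons t ts ih =>
      simp [List.flatMap_cons, split_eq_spl, spl_length]
      omega
  rw [hlen]
  by_cases h : strs.any (fun t => PySem.Str.isIn ";" t) = true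
  · obtain ⟨t, ht, hsemi⟩ := List.any_eq_true.mp h
    have hm : ';' ∈ t.toList := (isIn_semi_iff t).mp hsemi
    have h1 : 0 < t.toList.count ';' := List.count_pos_iff.mpr hm
    have h2 : t.toList.count ';' ≤ (strs.map (fun t => t.toList.count ';')).sum :=
      List.single_le_sum (by simp) _
        (List.mem_map_of_mem (f := fun t : String => t.toList.count ';') ht)
    have hpos : 0 < (strs.map (fun t => t.toList.count ';')).sum := lt_of_lt_of_le h1 h2
    rw [if_pos (by omega), if_pos h]
  · have h0 := List.any_eq_false.mp (by simpa using h)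
    have hsum : (strs.map (fun t => t.toList.count ';')).sum = 0 := by
      rw [List.sum_eq_zero]
      intro x hx
      obtain ⟨t, ht, rfl⟩ := List.mem_map.mp hx
      have hnot : ';' ∉ t.toList := fun hm =>
        h0 t ht (by simpa [PySem.Str.isIn] using (isIn_semi_iff t).mpr hm)
      simp [List.count_eq_zero, hnot]
    rw [if_neg (by omega), if_neg (by simpa using h)]

-- ===== VERDICT (by name: the statement is the Claim_ definition above) =====
theorem combine_columns_spec : Claim_equal_combine_columns := by
  intro row max_count _
  unfold Spec_combine_columns combine_columns combine_columns_alt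
  rw [foldA_inv]
  simp only [List.nil_append, zero_add, locus_eq]
  rw [← dupli_eq]
  rw [show (((row.filterMap id).length : Int) == (1:Int)) = ((row.filterMap id).length == 1)
    from by simp]
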